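-- pv_equiv track=rewrite | github.com/seanthelam/QuScope | src/quscope/eels_analysis/eels_utils.py | are_same_group
-- ===== SOURCE A (Python) =====
-- def are_same_group(element1, element2):
--     """
--     Determine if two elements are from the same periodic group.
--
--     Parameters:
--     -----------
--     element1 : str
--         First element.
--     element2 : str
--         Second element.
--
--     Returns:
--     --------
--     bool :
--         True if same group, else False.
--     """
--     groups = {
--         'alkali': ['Li', 'Na', 'K', 'Rb', 'Cs'],
--         'alkaline_earth': ['Be', 'Mg', 'Ca', 'Sr', 'Ba'],
--         'transition_metals': ['Sc', 'Ti', 'V', 'Cr', 'Mn', 'Fe', 'Co', 'Ni', 'Cu', 'Zn'],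
--         'carbon_group': ['C', 'Si', 'Ge', 'Sn', 'Pb'],
--         'nitrogen_group': ['N', 'P', 'As', 'Sb', 'Bi'],
--         'oxygen_group': ['O', 'S', 'Se', 'Te'],
--         'halogens': ['F', 'Cl', 'Br', 'I'],
--         'noble_gases': ['He', 'Ne', 'Ar', 'Kr', 'Xe', 'Rn']
--     }
--
--     for group_elements in groups.values():
--         if element1 in group_elements and element2 in group_elements:
--             return True
--
--     return False
-- ===== SOURCE B (Python) =====
-- def _group_of(element):
--     """Map an element symbol to a numeric group code, or None if unknown."""
--     if element in ('Li', 'Na', 'K', 'Rb', 'Cs'):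
--         return 1
--     elif element in ('Be', 'Mg', 'Ca', 'Sr', 'Ba'):
--         return 2
--     elif element in ('Sc', 'Ti', 'V', 'Cr', 'Mn', 'Fe', 'Co', 'Ni', 'Cu', 'Zn'):
--         return 3
--     elif element in ('C', 'Si', 'Ge', 'Sn', 'Pb'):
--         return 4
--     elif element in ('N', 'P', 'As', 'Sb', 'Bi'):
--         return 5
--     elif element in ('O', 'S', 'Se', 'Te'):
--         return 6
--     elif element in ('F', 'Cl', 'Br', 'I'):
--         return 7
--     elif element in ('He', 'Ne', 'Ar', 'Kr', 'Xe', 'Rn'):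
--         return 8
--     return None
--
--
-- def are_same_group(element1, element2):
--     """True iff both elements belong to the same periodic group (same as A).
--
--     Different decomposition: classify each element once with a group-code
--     function, then compare the two codes (guarding the both-unknown case),
--     instead of scanning every group for joint membership.
--     """
--     g1 = _group_of(element1)
--     return g1 is not None and g1 == _group_of(element2)
-- ===== Notes on version B (the rewrite author's own statement) =====
-- stated objective: alternative
-- what changed: Replaces A's per-group joint-membership scan over a name->list dict with a group-code classifier function applied to each element independently, followed by a guarded comparison of the two codes (None is never equal to a code).
import Mathlib
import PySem

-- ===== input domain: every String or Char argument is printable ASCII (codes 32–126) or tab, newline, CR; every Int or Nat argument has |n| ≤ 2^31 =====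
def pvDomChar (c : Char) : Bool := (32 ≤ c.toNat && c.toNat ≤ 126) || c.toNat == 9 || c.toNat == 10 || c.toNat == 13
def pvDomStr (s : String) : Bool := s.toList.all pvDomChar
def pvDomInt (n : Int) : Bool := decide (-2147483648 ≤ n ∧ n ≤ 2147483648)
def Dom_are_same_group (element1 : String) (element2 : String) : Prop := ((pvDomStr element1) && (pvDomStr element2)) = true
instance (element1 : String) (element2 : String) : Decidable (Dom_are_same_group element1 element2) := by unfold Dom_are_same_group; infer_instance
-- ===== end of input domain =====

-- B replaces A's per-group joint-membership scan by a group-code classifier applied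
-- to each element independently, then a guarded comparison of the codes (alternative
-- decomposition; same result).

-- ===== PORT A =====
-- the groups dict literal of A's source
def pvGroups : List (String × List String) :=
  [("alkali", ["Li", "Na", "K", "Rb", "Cs"]),
   ("alkaline_earth", ["Be", "Mg", "Ca", "Sr", "Ba"]),
   ("transition_metals", ["Sc", "Ti", "V", "Cr", "Mn", "Fe", "Co", "Ni", "Cu", "Zn"]),
   ("carbon_group", ["C", "Si", "Ge", "Sn", "Pb"]),
   ("nitrogen_group", ["N", "P", "As", "Sb", "Bi"]),
   ("oxygen_group", ["O", "S", "Se", "Te"]),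
   ("halogens", ["F", "Cl", "Br", "I"]),
   ("noble_gases", ["He", "Ne", "Ar", "Kr", "Xe", "Rn"])]

-- 'for group_elements in groups.values(): if e1 in ge and e2 in ge: return True; return False'
def pvLoopA (gs : List (List String)) (element1 element2 : String) : Bool :=
  match gs with
  | [] => false
  | g :: rest =>
    if g.contains element1 && g.contains element2 then true
    else pvLoopA rest element1 element2

def are_same_group (element1 : String) (element2 : String) : Bool :=
  pvLoopA (PySem.Dict.values (PySem.Dict.mk pvGroups)) element1 element2

-- ===== PORT B =====
-- '_group_of': the if/elif chain of tuple-membership tests returning a group code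
def pvGroupOf (element : String) : Option Int :=
  if ["Li", "Na", "K", "Rb", "Cs"].contains element then some 1
  else if ["Be", "Mg", "Ca", "Sr", "Ba"].contains element then some 2
  else if ["Sc", "Ti", "V", "Cr", "Mn", "Fe", "Co", "Ni", "Cu", "Zn"].contains element then some 3
  else if ["C", "Si", "Ge", "Sn", "Pb"].contains element then some 4
  else if ["N", "P", "As", "Sb", "Bi"].contains element then some 5
  else if ["O", "S", "Se", "Te"].contains element then some 6
  else if ["F", "Cl", "Br", "I"].contains element then some 7
  else if ["He", "Ne", "Ar", "Kr", "Xe", "Rn"].contains element then some 8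
  else none

-- 'g1 = _group_of(e1); return g1 is not None and g1 == _group_of(e2)'
def are_same_group_alt (element1 : String) (element2 : String) : Bool :=
  let g1 := pvGroupOf element1
  g1.isSome && (g1 == pvGroupOf element2)

-- ===== PRECONDITION & SPEC =====
def Spec_are_same_group (element1 : String) (element2 : String) (out : Bool) : Prop := out = are_same_group_alt element1 element2
instance (element1 : String) (element2 : String) (out : Bool) : Decidable (Spec_are_same_group element1 element2 out) := by unfold Spec_are_same_group; infer_instance

-- ===== CLAIM (what is proved, stated in full; the proofs are below) =====
def Claim_equal_are_same_group : Prop := ∀ (element1 : String) (element2 : String), Dom_are_same_group element1 element2 → Spec_are_same_group element1 element2 (are_same_group element1 element2)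

-- ===== LEMMAS AND PROOFS =====

-- first-match classification over (code, elements) pairs — the common shape
def pvLk (gs : List (Int × List String)) (e : String) : Option Int :=
  match gs with
  | [] => none
  | (n, els) :: rest => if els.contains e then some n else pvLk rest e

-- A's groups with codes in place of names
def pvGroupsInt : List (Int × List String) :=
  [(1, ["Li", "Na", "K", "Rb", "Cs"]),
   (2, ["Be", "Mg", "Ca", "Sr", "Ba"]),
   (3, ["Sc", "Ti", "V", "Cr", "Mn", "Fe", "Co", "Ni", "Cu", "Zn"]),
   (4, ["C", "Si", "Ge", "Sn", "Pb"]),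
   (5, ["N", "P", "As", "Sb", "Bi"]),
   (6, ["O", "S", "Se", "Te"]),
   (7, ["F", "Cl", "Br", "I"]),
   (8, ["He", "Ne", "Ar", "Kr", "Xe", "Rn"])]

lemma pvGroupOf_eq_lk (e : String) : pvGroupOf e = pvLk pvGroupsInt e := by
  simp [pvGroupOf, pvGroupsInt, pvLk]

lemma pvLk_mem_names (gs : List (Int × List String)) (e : String) (m : Int)
    (h : pvLk gs e = some m) : m ∈ gs.map Prod.fst := by
  induction gs with
  | nil => simp [pvLk] at h
  | cons p rest ih =>
    obtain ⟨n, els⟩ := p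
    by_cases hc : els.contains e
    · rw [pvLk, if_pos hc] at h
      obtain rfl : n = m := Option.some.inj h
      simp
    · rw [pvLk, if_neg hc] at h
      simp [ih h]

lemma pvLoopA_false_of_absent (gs : List (Int × List String)) (e1 e2 : String)
    (h : ∀ p ∈ gs, e1 ∉ p.2 ∨ e2 ∉ p.2) :
    pvLoopA (gs.map Prod.snd) e1 e2 = false := by
  induction gs with
  | nil => rfl
  | cons p rest ih =>
    simp only [List.map_cons, pvLoopA]
    rw [if_neg]
    · exact ih (fun q hq => h q (by simp [hq]))
    · rcases h p (by simp) with hp | hp <;> simp [hp]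

lemma beq_some_lk_false (gs : List (Int × List String)) (e : String) (n : Int)
    (hn : n ∉ gs.map Prod.fst) : (some n == pvLk gs e) = false := by
  cases h : pvLk gs e with
  | none => rfl
  | some m =>
    have hm := pvLk_mem_names gs e m h
    have hne : n ≠ m := fun he => hn (he ▸ hm)
    simp [hne]

lemma beq_lk_some_false (gs : List (Int × List String)) (e : String) (n : Int)
    (hn : n ∉ gs.map Prod.fst) : (pvLk gs e == some n) = false := by
  cases h : pvLk gs e with
  | none => rfl
  | some m =>
    have hm := pvLk_mem_names gs e m h
    have hne : m ≠ n := fun he => hn (he ▸ hm)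
    simp [hne]

-- main bridge: A's joint scan equals classify-then-compare, given globally distinct
-- elements (flattened element list Nodup) and distinct group codes
lemma pvMain (gs : List (Int × List String)) (e1 e2 : String)
    (hels : (gs.flatMap Prod.snd).Nodup) (hnames : (gs.map Prod.fst).Nodup) :
    pvLoopA (gs.map Prod.snd) e1 e2 =
      ((pvLk gs e1).isSome && (pvLk gs e1 == pvLk gs e2)) := by
  induction gs with
  | nil => simp [pvLk, pvLoopA]
  | cons p rest ih =>
    obtain ⟨n, els⟩ := p
    simp only [List.flatMap_cons, List.nodup_append] at hels
    obtain ⟨hels1, hels2, hdisj⟩ := hels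
    simp only [List.map_cons, List.nodup_cons] at hnames
    obtain ⟨hn, hnames2⟩ := hnames
    have habs : ∀ e : String, e ∈ els → ∀ q ∈ rest, e ∉ q.2 := by
      intro e hem q hq hmem
      exact hdisj e hem e (List.mem_flatMap.mpr ⟨q, hq, hmem⟩) rfl
    simp only [List.map_cons, pvLoopA, pvLk]
    by_cases h1 : e1 ∈ els
    · by_cases h2 : e2 ∈ els
      · simp [h1, h2]
      · have hA : pvLoopA (rest.map Prod.snd) e1 e2 = false :=
          pvLoopA_false_of_absent rest e1 e2 (fun q hq => Or.inl (habs e1 h1 q hq))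
        rw [if_neg (by simp [h2]), hA, if_pos (by simpa using h1),
          if_neg (by simpa using h2)]
        simp only [Option.isSome_some, Bool.true_and]
        exact (beq_some_lk_false rest e2 n hn).symm
    · by_cases h2 : e2 ∈ els
      · have hA : pvLoopA (rest.map Prod.snd) e1 e2 = false :=
          pvLoopA_false_of_absent rest e1 e2 (fun q hq => Or.inr (habs e2 h2 q hq))
        rw [if_neg (by simp [h1]), hA, if_neg (by simpa using h1),
          if_pos (by simpa using h2)]
        cases hlk : pvLk rest e1 with
        | none => rfl
        | some m =>
          have hb := beq_lk_some_false rest e1 n hn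
          rw [hlk] at hb
          simp [hb]
      · rw [if_neg (by simp [h1]), if_neg (by simpa using h1), if_neg (by simpa using h2)]
        exact ih hels2 hnames2

lemma pvValues_eq : PySem.Dict.values (PySem.Dict.mk pvGroups) = pvGroupsInt.map Prod.snd := by
  decide

lemma pvGroupsInt_els_nodup : (pvGroupsInt.flatMap Prod.snd).Nodup := by decide

lemma pvGroupsInt_codes_nodup : (pvGroupsInt.map Prod.fst).Nodup := by decide

-- ===== VERDICT (by name: the statement is the Claim_ definition above) =====
theorem are_same_group_spec : Claim_equal_are_same_group := by
  intro e1 e2 _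
  unfold Spec_are_same_group are_same_group are_same_group_alt
  rw [pvValues_eq, pvGroupOf_eq_lk, pvGroupOf_eq_lk]
  exact pvMain pvGroupsInt e1 e2 pvGroupsInt_els_nodup pvGroupsInt_codes_nodup
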